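-- pv_equiv track=rewrite | github.com/Degen-Collectibles/degen-deal-parser | app/inventory_pricing.py | _sliding_text_chunks
-- ===== SOURCE A (Python) =====
-- def _sliding_text_chunks(lines: list[str]) -> list[str]:
--     chunks: list[str] = []
--     if not lines:
--         return chunks
--     for size in range(3, min(8, len(lines)) + 1):
--         for index in range(0, len(lines) - size + 1):
--             window = lines[index:index + size]
--             if any("$" in line for line in window):
--                 chunks.append("\n".join(window))
--     if not chunks:
--         chunks.extend(lines)
--     return chunks
-- ===== SOURCE B (Python) =====
-- def _sliding_text_chunks(lines: list[str]) -> list[str]: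
--     if not lines:
--         return []
--     n = len(lines)
--     # prefix counts: pref[i] = number of lines[:i] containing "$"
--     pref = [0]
--     for line in lines:
--         pref.append(pref[-1] + (1 if "$" in line else 0))
--     chunks = [
--         "\n".join(lines[index:index + size])
--         for size in range(3, min(8, n) + 1)
--         for index in range(0, n - size + 1)
--         if pref[index + size] - pref[index] > 0
--     ]
--     return chunks if chunks else list(lines)
-- ===== Notes on version B (the rewrite author's own statement) =====
-- stated objective: faster
-- what changed: B precomputes a prefix-count table of lines containing '$' once and tests each sliding window by one prefix difference (and emits the chunks as a single comprehension), instead of A's rescan of every line of every window.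
import Mathlib
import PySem

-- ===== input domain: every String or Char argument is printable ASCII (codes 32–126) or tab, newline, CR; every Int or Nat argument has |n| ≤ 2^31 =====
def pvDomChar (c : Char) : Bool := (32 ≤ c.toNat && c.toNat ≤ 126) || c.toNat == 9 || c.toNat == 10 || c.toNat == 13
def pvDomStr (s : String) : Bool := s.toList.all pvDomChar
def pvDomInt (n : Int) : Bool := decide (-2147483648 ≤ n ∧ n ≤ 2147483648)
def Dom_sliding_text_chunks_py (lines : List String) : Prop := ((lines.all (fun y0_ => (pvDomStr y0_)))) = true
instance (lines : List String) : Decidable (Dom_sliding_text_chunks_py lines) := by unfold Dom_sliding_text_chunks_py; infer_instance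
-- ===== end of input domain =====

-- B replaces A's per-window "$"-scan by a prefix-count table queried per window; window emission order is unchanged.


-- ===== PORT A =====
def sliding_text_chunks_py (lines : List String) : List String :=
  let chunks : List String := []
  if lines = [] then chunks else
  let chunks := (PySem.List.pyRange 3 (min 8 (lines.length : Int) + 1) 1).foldl
    (fun chunks size =>
      (PySem.List.pyRange 0 ((lines.length : Int) - size + 1) 1).foldl
        (fun chunks index =>
          let window := PySem.List.slice lines (some index) (some (index + size))
          if window.any (fun line => PySem.Str.isIn "$" line) then
            chunks ++ [PySem.Str.join "\n" window]
          else chunks)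
        chunks)
    chunks
  if chunks = [] then chunks ++ lines else chunks

-- ===== PORT B =====
def sliding_text_chunks_py_alt (lines : List String) : List String :=
  if lines = [] then [] else
  let n : Int := lines.length
  let pref : List Int := lines.foldl
    (fun pref line =>
      pref ++ [PySem.List.pyGetD pref (-1) 0 + (if PySem.Str.isIn "$" line then 1 else 0)])
    [0]
  let chunks := (PySem.List.pyRange 3 (min 8 n + 1) 1).flatMap (fun size =>
    (PySem.List.pyRange 0 (n - size + 1) 1).filterMap (fun index =>
      if PySem.List.pyGetD pref (index + size) 0 - PySem.List.pyGetD pref index 0 > 0 then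
        some (PySem.Str.join "\n" (PySem.List.slice lines (some index) (some (index + size))))
      else none))
  if chunks = [] then lines else chunks

-- ===== PRECONDITION & SPEC =====
def Spec_sliding_text_chunks_py (lines : List String) (out : List String) : Prop := out = sliding_text_chunks_py_alt lines
instance (lines : List String) (out : List String) : Decidable (Spec_sliding_text_chunks_py lines out) := by unfold Spec_sliding_text_chunks_py; infer_instance

-- ===== CLAIM (what is proved, stated in full; the proofs are below) =====
def Claim_equal_sliding_text_chunks_py : Prop := ∀ (lines : List String), Dom_sliding_text_chunks_py lines → Spec_sliding_text_chunks_py lines (sliding_text_chunks_py lines)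

-- ===== LEMMAS AND PROOFS =====

-- the running prefix sums produced by B's fold, starting from count c
def pvSums (c : Int) : List String → List Int
  | [] => []
  | l :: ls =>
      (c + (if PySem.Str.isIn "$" l then 1 else 0)) ::
      pvSums (c + (if PySem.Str.isIn "$" l then 1 else 0)) ls

lemma pref_fold (ls : List String) : ∀ (acc : List Int) (c : Int),
    ls.foldl
      (fun pref line =>
        pref ++ [PySem.List.pyGetD pref (-1) 0 + (if PySem.Str.isIn "$" line then 1 else 0)])
      (acc ++ [c])
    = (acc ++ [c]) ++ pvSums c ls := by
  induction ls with
  | nil => intro acc c; simp [pvSums]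
  | cons l ls ih =>
      intro acc c
      simp only [List.foldl_cons, PySem.List.pyGetD_neg_one_append_singleton, pvSums]
      have := ih (acc ++ [c]) (c + (if PySem.Str.isIn "$" l then 1 else 0))
      simp only [List.append_assoc] at this ⊢
      exact this

lemma pvSums_getD (ls : List String) : ∀ (c : Int) (j : Nat), j < ls.length →
    (pvSums c ls).getD j 0
      = c + ((ls.take (j + 1)).countP (fun l => PySem.Str.isIn "$" l) : Int) := by
  induction ls with
  | nil => intro c j h; simp at h
  | cons l ls ih =>
      intro c j h
      cases j with
      | zero =>
          simp only [pvSums, List.getD_cons_zero, List.take_succ_cons, List.take_zero,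
            List.countP_cons, List.countP_nil]
          split_ifs <;> simp
      | succ k =>
          simp only [pvSums, List.getD_cons_succ, List.take_succ_cons, List.countP_cons]
          rw [ih _ k (by simpa using h)]
          split_ifs <;> push_cast <;> ring

lemma pref_getD (lines : List String) (j : Nat) (hj : j ≤ lines.length) :
    (0 :: pvSums 0 lines).getD j 0
      = ((lines.take j).countP (fun l => PySem.Str.isIn "$" l) : Int) := by
  cases j with
  | zero => simp
  | succ k =>
      rw [List.getD_cons_succ, pvSums_getD lines 0 k (by omega)]
      simp

-- B's prefix-difference test agrees with A's window scan
lemma cond_eq (lines : List String) (i s : Int) (hi : 0 ≤ i) (hs : 0 ≤ s)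
    (hn : i + s ≤ (lines.length : Int)) :
    (decide (PySem.List.pyGetD (0 :: pvSums 0 lines) (i + s) 0
              - PySem.List.pyGetD (0 :: pvSums 0 lines) i 0 > 0))
    = (PySem.List.slice lines (some i) (some (i + s))).any (fun line => PySem.Str.isIn "$" line) := by
  rw [PySem.List.pyGetD_of_nonneg _ _ (by omega), PySem.List.pyGetD_of_nonneg _ _ hi,
    pref_getD lines (i + s).toNat (by omega), pref_getD lines i.toNat (by omega),
    PySem.List.slice_toNat _ hi (by omega)]
  have hdt : (i + s).toNat - i.toNat = s.toNat := by omega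
  have hsplit : (i + s).toNat = i.toNat + s.toNat := by omega
  rw [hdt, hsplit, List.take_add, List.countP_append]
  rw [Bool.eq_iff_iff, decide_eq_true_eq, List.any_eq_true, ← List.countP_pos_iff]
  push_cast
  have he : List.countP (PySem.Str.isIn "$") (List.take s.toNat (List.drop i.toNat lines))
      = List.countP (fun l => PySem.Str.isIn "$" l) (List.take s.toNat (List.drop i.toNat lines)) := rfl
  rw [he]
  omega

-- '[f(x) for x in l if p(x)]' as filter-then-map
lemma filterMap_if {α β : Type} (l : List α) (p : α → Prop) [DecidablePred p] (f : α → β) :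
    (l.filterMap (fun x => if p x then some (f x) else none))
      = (l.filter (fun x => decide (p x))).map f := by
  induction l with
  | nil => rfl
  | cons a l ih =>
      by_cases h : p a <;> simp [h, ih]

lemma if_empty_append (c l : List String) :
    (if c = [] then c ++ l else c) = (if c = [] then l else c) := by
  split_ifs with h
  · rw [h, List.nil_append]
  · rfl

-- ===== VERDICT (by name: the statement is the Claim_ definition above) =====
theorem sliding_text_chunks_py_spec : Claim_equal_sliding_text_chunks_py := by
  unfold Claim_equal_sliding_text_chunks_py
  intro lines _
  unfold Spec_sliding_text_chunks_py sliding_text_chunks_py sliding_text_chunks_py_alt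
  by_cases h : lines = []
  · simp [h]
  · simp only [h, if_false]
    -- B's pref is the prefix-sum list
    have hp := pref_fold lines [] 0
    simp only [List.nil_append] at hp
    rw [hp]
    simp only [List.cons_append, List.nil_append]
    -- rewrite A's nested folds into flatMap/filter/map form
    have houter :
        (fun (chunks : List String) (size : Int) =>
          (PySem.List.pyRange 0 ((lines.length : Int) - size + 1) 1).foldl
            (fun chunks index =>
              let window := PySem.List.slice lines (some index) (some (index + size))
              if window.any (fun line => PySem.Str.isIn "$" line) then
                chunks ++ [PySem.Str.join "\n" window]
              else chunks)
            chunks)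
        = (fun (chunks : List String) (size : Int) =>
            chunks ++
              ((PySem.List.pyRange 0 ((lines.length : Int) - size + 1) 1).filter
                  (fun index =>
                    (PySem.List.slice lines (some index) (some (index + size))).any
                      (fun line => PySem.Str.isIn "$" line))).map
                (fun index =>
                  PySem.Str.join "\n" (PySem.List.slice lines (some index) (some (index + size))))) := by
      funext chunks size
      exact PySem.List.foldl_append_if _ _ _ _
    rw [houter, PySem.List.foldl_append_eq_flatMap, List.nil_append, if_empty_append]
    -- rewrite B's comprehension and match window predicates pointwise
    refine congrArg (fun c => if c = [] then lines else c) ?_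
    refine List.flatMap_congr (fun size hsize => ?_)
    refine Eq.symm ((filterMap_if _ _ _).trans ?_)
    refine Eq.symm ?_
    refine congrArg (List.map _) (List.filter_congr (fun index hidx => ?_))
    rw [PySem.List.mem_pyRange_one] at hsize hidx
    exact (cond_eq lines index size (by omega) (by omega) (by omega)).symm
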